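-- pv_equiv track=rewrite | github.com/ruidantas04/PL2025-A104008 | TP2/tp2.py | separar_campos
-- ===== SOURCE A (Python) =====
-- def separar_campos(linha):
--     """Separa os campos respeitando aspas e ponto e vírgula."""
--     campos = []
--     campo_atual = ""
--     dentro_de_aspas = False
--
--     for char in linha:
--         if char == '"':
--             dentro_de_aspas = not dentro_de_aspas  # Alterna estado de dentro/fora de aspas
--         elif char == ";" and not dentro_de_aspas:
--             campos.append(campo_atual.strip())  # Adiciona campo completo
--             campo_atual = ""
--         else:
--             campo_atual += char  # Adiciona caractere ao campo atual
--
--     campos.append(campo_atual.strip())  # Adiciona o último campo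
--     return campos
-- ===== SOURCE B (Python) =====
-- def separar_campos(linha):
--     """Separa os campos respeitando aspas e ponto e vírgula."""
--     segmentos = []
--     inicio = 0
--     dentro_de_aspas = False
--     for i, char in enumerate(linha):
--         if char == '"':
--             dentro_de_aspas = not dentro_de_aspas
--         elif char == ";" and not dentro_de_aspas:
--             segmentos.append(linha[inicio:i])
--             inicio = i + 1
--     segmentos.append(linha[inicio:])
--     return [seg.replace('"', '').strip() for seg in segmentos]
-- ===== Notes on version B (the rewrite author's own statement) =====
-- stated objective: alternative
-- what changed: B splits the line into raw segments by index (cutting at unquoted ';' and keeping quote marks and protected chars in place), then in a separate second pass removes quotes and strips each segment, instead of A's single loop that accumulates a quote-free field character by character.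
import Mathlib
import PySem

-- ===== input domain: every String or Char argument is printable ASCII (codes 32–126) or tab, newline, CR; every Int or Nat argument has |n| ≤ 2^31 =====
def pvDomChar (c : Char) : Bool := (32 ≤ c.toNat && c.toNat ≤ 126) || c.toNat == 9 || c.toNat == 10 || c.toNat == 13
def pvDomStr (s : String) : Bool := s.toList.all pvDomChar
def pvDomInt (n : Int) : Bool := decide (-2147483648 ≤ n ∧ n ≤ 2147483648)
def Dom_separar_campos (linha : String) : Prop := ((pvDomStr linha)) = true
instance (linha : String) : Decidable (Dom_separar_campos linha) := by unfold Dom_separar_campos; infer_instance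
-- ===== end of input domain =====

-- B separates the work into two passes — raw index-based splitting on unquoted ';',
-- then a cleanup map removing quotes and stripping — instead of A's single character-
-- accumulating loop; objective: alternative decomposition, same cost.

-- ===== PORT A =====
-- A's loop step: state = (campos, campo_atual, dentro_de_aspas)
def stepA (st : List (List Char) × List Char × Bool) (c : Char) :
    List (List Char) × List Char × Bool :=
  if c == '"' then (st.1, st.2.1, !st.2.2)
  else if c == ';' && !st.2.2 then (st.1 ++ [PySem.Chars.strip st.2.1], [], st.2.2)
  else (st.1, st.2.1 ++ [c], st.2.2)

def separar_campos (linha : String) : List String :=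
  let st := linha.toList.foldl stepA ([], [], false)
  (st.1 ++ [PySem.Chars.strip st.2.1]).map String.mk

-- ===== PORT B =====
-- B's loop step over enumerate: state = (segmentos, inicio, dentro_de_aspas); cs = linha
def stepB (cs : List Char) (st : List (List Char) × Int × Bool) (p : Int × Char) :
    List (List Char) × Int × Bool :=
  if p.2 == '"' then (st.1, st.2.1, !st.2.2)
  else if p.2 == ';' && !st.2.2 then
    (st.1 ++ [PySem.List.slice cs (some st.2.1) (some p.1)], p.1 + 1, st.2.2)
  else st

def separar_campos_alt (linha : String) : List String :=
  let cs := linha.toList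
  let st := (PySem.List.enumerate cs 0).foldl (stepB cs) ([], 0, false)
  (st.1 ++ [PySem.List.slice cs (some st.2.1) none]).map
    (fun seg => String.mk (PySem.Chars.strip (PySem.Chars.replace seg ['"'] [])))

-- ===== PRECONDITION & SPEC =====
def Spec_separar_campos (linha : String) (out : List String) : Prop := out = separar_campos_alt linha
instance (linha : String) (out : List String) : Decidable (Spec_separar_campos linha out) := by unfold Spec_separar_campos; infer_instance

-- ===== CLAIM (what is proved, stated in full; the proofs are below) =====
def Claim_equal_separar_campos : Prop := ∀ (linha : String), Dom_separar_campos linha → Spec_separar_campos linha (separar_campos linha)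

-- ===== LEMMAS AND PROOFS =====

-- raw segmentation of a character list at unquoted ';' (head segment, tail segments)
def splitRaw : List Char → Bool → List Char × List (List Char)
  | [], _ => ([], [])
  | c :: t, d =>
    if c = '"' then (c :: (splitRaw t (!d)).1, (splitRaw t (!d)).2)
    else if c = ';' ∧ d = false then ([], (splitRaw t d).1 :: (splitRaw t d).2)
    else (c :: (splitRaw t d).1, (splitRaw t d).2)

def rmQ (s : List Char) : List Char := s.filter (· != '"')

def cleanup (s : List Char) : List Char := PySem.Chars.strip (rmQ s)

theorem go_quote : ∀ (fuel : Nat) (l acc : List Char), l.length ≤ fuel →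
    PySem.Chars.replace.go ['"'] [] fuel l acc = acc.reverse ++ l.filter (· != '"') := by
  intro fuel
  induction fuel with
  | zero => intro l acc h; simp at h; simp [h, PySem.Chars.replace.go]
  | succ n ih =>
    intro l acc h
    cases l with
    | nil => simp [PySem.Chars.replace.go]
    | cons c t =>
      rw [PySem.Chars.replace.go]
      by_cases hc : c = '"'
      · subst hc
        simp [List.isPrefixOf]
        rw [ih t acc (by simpa using h)]
      · have hpre : List.isPrefixOf ['"'] (c :: t) = false := by
          simp [List.isPrefixOf]; exact fun hh => hc hh.symm
        simp [hpre, hc]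
        rw [ih t (c :: acc) (by simpa using h)]
        simp

theorem replace_quote (s : List Char) : PySem.Chars.replace s ['"'] [] = rmQ s := by
  rw [PySem.Chars.replace, rmQ]
  simp [go_quote s.length s [] le_rfl]

-- A's loop computes the cleaned segments of splitRaw, with the pending campo prepended
theorem A_loop : ∀ (cs : List Char) (campos : List (List Char)) (campo : List Char) (d : Bool),
    (let st := cs.foldl stepA (campos, campo, d)
     st.1 ++ [PySem.Chars.strip st.2.1])
    = campos ++ PySem.Chars.strip (campo ++ rmQ (splitRaw cs d).1)
        :: (splitRaw cs d).2.map cleanup := by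
  intro cs
  induction cs with
  | nil => intro campos campo d; simp [splitRaw, rmQ]
  | cons c t ih =>
    intro campos campo d
    by_cases hc : c = '"'
    · subst hc
      simp only [List.foldl_cons, stepA, if_pos rfl, splitRaw, beq_self_eq_true, if_true]
      rw [ih]
      simp [rmQ]
    · by_cases hsc : c = ';' ∧ d = false
      · obtain ⟨hc2, hd⟩ := hsc
        subst hc2; subst hd
        simp only [List.foldl_cons, stepA]
        norm_num [hc]
        rw [ih]
        simp [splitRaw, rmQ, cleanup]
      · have hcond : (c == ';' && !d) = false := by
          rcases Bool.eq_false_or_eq_true d with hd | hd <;> subst hd <;> simp_all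
        simp only [List.foldl_cons, stepA, beq_iff_eq, if_neg hc, hcond, Bool.false_eq_true,
          if_false]
        rw [ih]
        have hr : splitRaw (c :: t) d = (c :: (splitRaw t d).1, (splitRaw t d).2) := by
          rw [splitRaw]; rw [if_neg hc, if_neg hsc]
        rw [hr]
        simp [rmQ, hc]

-- the take of one more character past index i
theorem take_succ_of_drop {cs suf : List Char} {c : Char} {i start : Nat}
    (hdrop : cs.drop i = c :: suf) (hle : start ≤ i) :
    (cs.drop start).take (i + 1 - start) = (cs.drop start).take (i - start) ++ [c] := by
  have h1 : i + 1 - start = (i - start) + 1 := by omega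
  have h2 : (cs.drop start)[i - start]? = some c := by
    rw [List.getElem?_drop]
    have : start + (i - start) = i := by omega
    rw [this]
    have := congrArg (·[0]?) hdrop
    simpa [List.getElem?_drop] using this
  rw [h1, List.take_add_one, h2]
  rfl

-- B's loop over the enumerated suffix computes the raw segments, head-extended by the open slice
theorem B_loop : ∀ (suf cs : List Char) (i : Nat) (segs : List (List Char)) (start : Nat)
    (d : Bool), cs.drop i = suf → start ≤ i →
    (let st := (PySem.List.enumerate suf (i : Int)).foldl (stepB cs) (segs, (start : Int), d)
     st.1 ++ [PySem.List.slice cs (some st.2.1) none])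
    = segs ++ ((cs.drop start).take (i - start) ++ (splitRaw suf d).1) :: (splitRaw suf d).2 := by
  intro suf
  induction suf with
  | nil =>
    intro cs i segs start d hdrop hle
    have hlen : cs.length ≤ i := by
      have := congrArg List.length hdrop
      simp at this; omega
    have : (cs.drop start).take (i - start) = cs.drop start := by
      apply List.take_of_length_le
      simp; omega
    simp [PySem.List.enumerate, splitRaw, this, PySem.List.slice_from_natCast]
  | cons c rest ih =>
    intro cs i segs start d hdrop hle
    rw [PySem.List.enumerate_cons]
    by_cases hc : c = '"'
    · subst hc
      simp only [List.foldl_cons, stepB, beq_self_eq_true, if_true]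
      have hrec := ih cs (i + 1) segs start (!d) (by
        have := congrArg List.tail hdrop
        simpa [List.tail_drop] using this) (by omega)
      push_cast at hrec ⊢
      rw [hrec]
      rw [take_succ_of_drop hdrop hle]
      simp [splitRaw]
    · by_cases hsc : c = ';' ∧ d = false
      · obtain ⟨hc2, hd⟩ := hsc
        subst hc2; subst hd
        simp only [List.foldl_cons, stepB]
        norm_num [hc]
        have hrec := ih cs (i + 1) (segs ++ [PySem.List.slice cs (some (start : Int)) (some (i : Int))])
          (i + 1) false (by
            have := congrArg List.tail hdrop
            simpa [List.tail_drop] using this) (by omega)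
        push_cast at hrec ⊢
        rw [hrec]
        have hsl : PySem.List.slice cs (some (start : Int)) (some (i : Int))
            = (cs.drop start).take (i - start) := by
          simp [PySem.List.slice_natCast]
        rw [hsl]
        simp [splitRaw]
      · have hcond : (c == ';' && !d) = false := by
          rcases Bool.eq_false_or_eq_true d with hd | hd <;> subst hd <;> simp_all
        simp only [List.foldl_cons, stepB, beq_iff_eq, if_neg hc, hcond, Bool.false_eq_true,
          if_false]
        have hrec := ih cs (i + 1) segs start d (by
          have := congrArg List.tail hdrop
          simpa [List.tail_drop] using this) (by omega)
        push_cast at hrec ⊢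
        rw [hrec]
        rw [take_succ_of_drop hdrop hle]
        have hr : splitRaw (c :: rest) d = (c :: (splitRaw rest d).1, (splitRaw rest d).2) := by
          rw [splitRaw]; rw [if_neg hc, if_neg hsc]
        rw [hr]
        simp

-- ===== VERDICT (by name: the statement is the Claim_ definition above) =====
theorem separar_campos_spec : Claim_equal_separar_campos := by
  intro linha _
  simp only [Spec_separar_campos, separar_campos, separar_campos_alt]
  have hA := A_loop linha.toList [] [] false
  have hB := B_loop linha.toList linha.toList 0 [] 0 false rfl le_rfl
  push_cast at hB
  simp only at hA hB
  rw [hA, hB]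
  simp [cleanup, replace_quote]
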